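-- pv_equiv track=rewrite | github.com/Billrong2/Code-Adaptation | testing/similarity_metrics.py | _strip_dummy_wrapper
-- ===== SOURCE A (Python) =====
-- def _strip_dummy_wrapper(snippet: str) -> str:
--     lines = snippet.splitlines()
--     if not lines:
--         return ""
--     # find first non-empty and last non-empty
--     first_idx = next((i for i, ln in enumerate(lines) if ln.strip()), 0)
--     last_idx = len(lines) - 1 - next((i for i, ln in enumerate(reversed(lines)) if ln.strip()), 0)
--     first = lines[first_idx].strip()
--     last = lines[last_idx].strip()
--     if "class " in first and last == "}":
--         inner = lines[first_idx + 1 : last_idx]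
--         return "\n".join(inner).strip()
--     return snippet.strip()
-- ===== SOURCE B (Python) =====
-- def _strip_dummy_wrapper(snippet: str) -> str:
--     s = snippet.strip()
--     if not s:
--         return ""
--     t = s.replace("\r\n", "\n").replace("\r", "\n")
--     cut = t.find("\n")
--     if cut == -1:
--         return s
--     first = t[:cut].strip()
--     j = t.rfind("\n")
--     last = t[j + 1:].strip()
--     if "class " in first and last == "}":
--         return t[cut + 1:j].strip()
--     return s
-- ===== Notes on version B (the rewrite author's own statement) =====
-- stated objective: alternative
-- what changed: B never builds or scans a list of lines: it strips the snippet, normalizes line endings with str.replace, and locates the first and last line directly by find/rfind of a newline character, returning the inner part as one substring slice instead of A's splitlines + two next()/enumerate index scans + list slice + join.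
import Mathlib
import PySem

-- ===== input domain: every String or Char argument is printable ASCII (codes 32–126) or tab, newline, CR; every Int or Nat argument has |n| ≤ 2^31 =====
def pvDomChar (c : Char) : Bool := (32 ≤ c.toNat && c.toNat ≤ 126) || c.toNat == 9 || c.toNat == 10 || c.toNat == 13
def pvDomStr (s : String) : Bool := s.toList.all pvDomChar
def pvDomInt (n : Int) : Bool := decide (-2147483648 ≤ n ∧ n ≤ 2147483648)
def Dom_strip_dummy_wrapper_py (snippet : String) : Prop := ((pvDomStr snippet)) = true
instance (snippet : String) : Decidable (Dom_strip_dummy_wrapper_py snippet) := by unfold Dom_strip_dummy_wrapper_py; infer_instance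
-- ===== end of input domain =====

-- B never builds a list of lines: it strips, normalizes line endings with replace, and finds the
-- first/last line by find/rfind of '\n', returning the inner part as one substring slice.

-- ===== PORT A =====
-- helper: next((i for i, x in enumerate(xs) if p x), <default handled by .getD>) as an Option-returning scan
def pvNext {α : Type} (p : α → Bool) : Nat → List α → Option Nat
  | _, [] => none
  | i, x :: rest => if p x then some i else pvNext p (i + 1) rest

def strip_dummy_wrapper_py (snippet : String) : String :=
  let lines := PySem.Str.splitlines snippet
  if lines = [] then ""
  else
    let firstIdx : Int := ((pvNext (fun ln => decide (PySem.Str.strip ln ≠ "")) 0 lines).getD 0 : Nat)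
    let lastIdx : Int := (lines.length : Int) - 1 -
      ((pvNext (fun ln => decide (PySem.Str.strip ln ≠ "")) 0 lines.reverse).getD 0 : Nat)
    let first := PySem.Str.strip (PySem.List.pyGetD lines firstIdx "")
    let last := PySem.Str.strip (PySem.List.pyGetD lines lastIdx "")
    if PySem.Str.isIn "class " first && last == "}" then
      let inner := PySem.List.slice lines (some (firstIdx + 1)) (some lastIdx)
      PySem.Str.strip (PySem.Str.join "\n" inner)
    else PySem.Str.strip snippet

-- ===== PORT B =====
def strip_dummy_wrapper_py_alt (snippet : String) : String :=
  let s := PySem.Str.strip snippet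
  if s = "" then ""
  else
    let t := PySem.Str.replace (PySem.Str.replace s "\r\n" "\n") "\r" "\n"
    let cut := PySem.Str.find t "\n"
    if cut = -1 then s
    else
      let first := PySem.Str.strip (PySem.Str.slice t none (some cut))
      let j := PySem.Str.rfind t "\n"
      let last := PySem.Str.strip (PySem.Str.slice t (some (j + 1)) none)
      if PySem.Str.isIn "class " first && last == "}" then
        PySem.Str.strip (PySem.Str.slice t (some (cut + 1)) (some j))
      else s

-- ===== PRECONDITION & SPEC =====
def Spec_strip_dummy_wrapper_py (snippet : String) (out : String) : Prop := out = strip_dummy_wrapper_py_alt snippet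
instance (snippet : String) (out : String) : Decidable (Spec_strip_dummy_wrapper_py snippet out) := by unfold Spec_strip_dummy_wrapper_py; infer_instance

-- ===== CLAIM (what is proved, stated in full; the proofs are below) =====
def Claim_equal_strip_dummy_wrapper_py : Prop := ∀ (snippet : String), Dom_strip_dummy_wrapper_py snippet → Spec_strip_dummy_wrapper_py snippet (strip_dummy_wrapper_py snippet)

-- ===== LEMMAS AND PROOFS =====
-- proof-only helper: the strip-then-splitlines middle form; A is proved equal to pvMid, pvMid to B's port
def pvMid (snippet : String) : String :=
  let s := PySem.Str.strip snippet
  if s = "" then ""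
  else
    let lines := PySem.Str.splitlines s
    let first := PySem.Str.strip (PySem.List.pyGetD lines 0 "")
    let last := PySem.Str.strip (PySem.List.pyGetD lines (-1) "")
    if PySem.Str.isIn "class " first && last == "}" then
      PySem.Str.strip (PySem.Str.join "\n" (PySem.List.slice lines (some 1) (some (-1))))
    else s

def pvIsB (c : Char) : Bool :=
  have n := c.toNat
  decide (n = 10) || decide (n = 13) || decide (n = 11) || decide (n = 12) || decide (n = 28) || decide (n = 29) ||
    decide (n = 30) || decide (n = 133) || decide (n = 8232) || decide (n = 8233)
def pvSL (s : List Char) : List (List Char) :=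
  match s with
  | [] => []
  | '\r' :: '\n' :: rest => [] :: pvSL rest
  | c :: rest =>
    if pvIsB c then [] :: pvSL rest
    else match pvSL rest with
      | [] => [[c]]
      | L :: LS => (c :: L) :: LS
def pvGlue (cur : List Char) (ls : List (List Char)) : List (List Char) :=
  match ls with
  | [] => if cur.isEmpty then [] else [cur.reverse]
  | L :: LS => (cur.reverse ++ L) :: LS

theorem pvGlue_nil (ls : List (List Char)) : pvGlue [] ls = ls := by
  cases ls <;> simp [pvGlue]

theorem pvGo_eq (s : List Char) : ∀ (cur : List Char) (acc : List (List Char)),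
    PySem.Chars.splitlines.go pvIsB s cur acc = acc.reverse ++ pvGlue cur (pvSL s) := by
  induction s using pvSL.induct with
  | case1 => intro cur acc; simp only [PySem.Chars.splitlines.go, pvSL, pvGlue]; split <;> simp_all
  | case2 rest ih =>
    intro cur acc
    simp only [PySem.Chars.splitlines.go, ih, pvGlue_nil, List.reverse_cons, List.append_assoc,
      List.cons_append, List.nil_append]
    simp [pvSL, pvGlue]
  | case3 c rest h hB ih =>
    intro cur acc
    rw [PySem.Chars.splitlines.go.eq_def]
    split
    · rename_i heq; exact absurd heq (List.cons_ne_nil _ _)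
    · rename_i heq
      injection heq with h1 h2
      exact (h _ h1 h2).elim
    · rename_i c' rest' heq
      injection heq with h1 h2; subst h1; subst h2
      rw [if_pos hB, ih]
      rw [show pvSL (c :: rest) = [] :: pvSL rest by
        rw [pvSL.eq_def]
        split
        · rename_i heq; exact absurd heq (List.cons_ne_nil _ _)
        · rename_i heq
          injection heq with h1 h2
          exact (h _ h1 h2).elim
        · rename_i c' rest' heq
          injection heq with h1 h2; subst h1; subst h2; rw [if_pos hB]]
      simp only [pvGlue, pvGlue_nil, List.reverse_cons, List.append_assoc, List.cons_append, List.nil_append]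
      cases pvSL rest <;> simp [pvGlue]
  | case4 c rest h hB hnil ih =>
    intro cur acc
    rw [PySem.Chars.splitlines.go.eq_def]
    split
    · rename_i heq; exact absurd heq (List.cons_ne_nil _ _)
    · rename_i heq
      injection heq with h1 h2
      exact (h _ h1 h2).elim
    · rename_i c' rest' heq
      injection heq with h1 h2; subst h1; subst h2
      rw [if_neg hB, ih]
      rw [show pvSL (c :: rest) = [[c]] by
        rw [pvSL.eq_def]
        split
        · rename_i heq; exact absurd heq (List.cons_ne_nil _ _)
        · rename_i heq
          injection heq with h1 h2
          exact (h _ h1 h2).elim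
        · rename_i c' rest' heq
          injection heq with h1 h2; subst h1; subst h2; rw [if_neg hB, hnil]]
      simp [pvGlue, hnil]
  | case5 c rest h hB L LS hLS ih =>
    intro cur acc
    rw [PySem.Chars.splitlines.go.eq_def]
    split
    · rename_i heq; exact absurd heq (List.cons_ne_nil _ _)
    · rename_i heq
      injection heq with h1 h2
      exact (h _ h1 h2).elim
    · rename_i c' rest' heq
      injection heq with h1 h2; subst h1; subst h2
      rw [if_neg hB, ih]
      rw [show pvSL (c :: rest) = (c :: L) :: LS by
        rw [pvSL.eq_def]
        split
        · rename_i heq; exact absurd heq (List.cons_ne_nil _ _)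
        · rename_i heq
          injection heq with h1 h2
          exact (h _ h1 h2).elim
        · rename_i c' rest' heq
          injection heq with h1 h2; subst h1; subst h2; rw [if_neg hB, hLS]]
      simp [pvGlue, hLS]

theorem pvSplitlines_eq (s : List Char) : PySem.Chars.splitlines s = pvSL s := by
  have : PySem.Chars.splitlines s = PySem.Chars.splitlines.go pvIsB s [] [] := rfl
  rw [this, pvGo_eq]
  simp [pvGlue_nil]

def pvBlank (L : List Char) : Bool := L.all PySem.Chars.isspace
def pvHeadL (ls : List (List Char)) : List (List Char) :=
  match ls with | [] => [] | L :: LS => PySem.Chars.lstrip L :: LS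
def pvHeadR (ls : List (List Char)) : List (List Char) :=
  match ls with | [] => [] | L :: LS => PySem.Chars.rstrip L :: LS

theorem pvIsB_isspace (c : Char) (h : pvIsB c = true) : PySem.Chars.isspace c = true := by
  simp [pvIsB] at h
  simp [PySem.Chars.isspace]
  omega

theorem pvLstrip_cons (c : Char) (t : List Char) :
    PySem.Chars.lstrip (c :: t) = if PySem.Chars.isspace c then PySem.Chars.lstrip t else c :: t := by
  simp [PySem.Chars.lstrip, List.dropWhile_cons]

theorem pvSL_cons_ne_nil (c : Char) (rest : List Char) : pvSL (c :: rest) ≠ [] := by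
  rw [pvSL.eq_def]
  split
  · rename_i heq; exact absurd heq (List.cons_ne_nil _ _)
  · simp
  · rename_i c' rest' heq
    injection heq with h1 h2; subst h1; subst h2
    split
    · simp
    · split <;> simp

theorem pvSL_crlf (rest : List Char) : pvSL ('\r' :: '\n' :: rest) = [] :: pvSL rest := rfl

theorem pvSL_cons_B (c : Char) (rest : List Char)
    (h : ∀ (r : List Char), c = '\r' → rest = '\n' :: r → False) (hB : pvIsB c = true) :
    pvSL (c :: rest) = [] :: pvSL rest := by
  rw [pvSL.eq_def]
  split
  · rename_i heq; exact absurd heq (List.cons_ne_nil _ _)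
  · rename_i heq; injection heq with h1 h2; exact (h _ h1 h2).elim
  · rename_i c' rest' heq; injection heq with h1 h2; subst h1; subst h2
    rw [if_pos hB]

theorem pvSL_cons_nB (c : Char) (rest : List Char)
    (h : ∀ (r : List Char), c = '\r' → rest = '\n' :: r → False) (hB : ¬ pvIsB c = true) :
    pvSL (c :: rest) = match pvSL rest with | [] => [[c]] | L :: LS => (c :: L) :: LS := by
  rw [pvSL.eq_def]
  split
  · rename_i heq; exact absurd heq (List.cons_ne_nil _ _)
  · rename_i heq; injection heq with h1 h2; exact (h _ h1 h2).elim
  · rename_i c' rest' heq; injection heq with h1 h2; subst h1; subst h2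
    rw [if_neg hB]

theorem pvBlank_all (s : List Char) : (pvSL s).all pvBlank = s.all PySem.Chars.isspace := by
  induction s using pvSL.induct with
  | case1 => simp [pvSL]
  | case2 rest ih =>
    rw [pvSL_crlf]
    simp [pvBlank, ih, show PySem.Chars.isspace '\r' = true from rfl,
      show PySem.Chars.isspace '\n' = true from rfl]
  | case3 c rest h hB ih =>
    rw [pvSL_cons_B c rest h hB]
    simp [pvBlank, ih, pvIsB_isspace c hB]
  | case4 c rest h hB hnil ih =>
    rcases rest with _ | ⟨x, t⟩
    · simp [pvSL_cons_nB c [] h hB, pvSL, pvBlank]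
    · exact absurd hnil (pvSL_cons_ne_nil _ _)
  | case5 c rest h hB L LS hLS ih =>
    rw [pvSL_cons_nB c rest h hB, hLS]
    rw [hLS] at ih
    simp only [List.all_cons, pvBlank] at ih ⊢
    rw [Bool.and_assoc, ih]

theorem pvSL_lstrip (s : List Char) :
    pvSL (PySem.Chars.lstrip s) = pvHeadL ((pvSL s).dropWhile pvBlank) := by
  induction s using pvSL.induct with
  | case1 => simp [PySem.Chars.lstrip, pvSL, pvHeadL]
  | case2 rest ih =>
    rw [pvSL_crlf]
    rw [show PySem.Chars.lstrip ('\r' :: '\n' :: rest) = PySem.Chars.lstrip rest by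
      rw [pvLstrip_cons, pvLstrip_cons]
      simp [show PySem.Chars.isspace '\r' = true from rfl, show PySem.Chars.isspace '\n' = true from rfl]]
    rw [ih]
    simp [List.dropWhile_cons, pvBlank]
  | case3 c rest h hB ih =>
    rw [pvSL_cons_B c rest h hB, pvLstrip_cons, if_pos (pvIsB_isspace c hB), ih]
    simp [List.dropWhile_cons, pvBlank]
  | case4 c rest h hB hnil ih =>
    have hB' : pvIsB c = false := by simpa using hB
    rcases rest with _ | ⟨x, t⟩
    · rw [pvSL_cons_nB c [] h hB]
      by_cases hc : PySem.Chars.isspace c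
      · simp [pvSL, pvLstrip_cons, hc, PySem.Chars.lstrip, pvBlank, pvHeadL, List.dropWhile_cons, hB']
      · simp [pvSL, pvLstrip_cons, hc, PySem.Chars.lstrip, pvBlank, pvHeadL, List.dropWhile_cons, hB']
    · exact absurd hnil (pvSL_cons_ne_nil _ _)
  | case5 c rest h hB L LS hLS ih =>
    rw [pvSL_cons_nB c rest h hB, hLS, pvLstrip_cons]
    rw [hLS] at ih
    by_cases hc : PySem.Chars.isspace c
    · rw [if_pos hc, ih]
      rw [List.dropWhile_cons, List.dropWhile_cons,
        show pvBlank (c :: L) = pvBlank L by simp [pvBlank, hc]]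
      by_cases hL : pvBlank L
      · rw [if_pos hL, if_pos hL]
      · rw [if_neg hL, if_neg hL]
        simp [pvHeadL, pvLstrip_cons, hc]
    · rw [if_neg hc]
      rw [pvSL_cons_nB c rest h hB, hLS]
      rw [List.dropWhile_cons, show pvBlank (c :: L) = false by simp [pvBlank, hc]]
      simp [pvHeadL, pvLstrip_cons, hc]

theorem pvRstrip_nil_iff (s : List Char) :
    PySem.Chars.rstrip s = [] ↔ s.all PySem.Chars.isspace := by
  simp [PySem.Chars.rstrip, List.dropWhile_eq_nil_iff, List.all_eq_true]

theorem pvRstrip_cons (c : Char) (t : List Char) :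
    PySem.Chars.rstrip (c :: t) =
      if t.all PySem.Chars.isspace then (if PySem.Chars.isspace c then [] else [c])
      else c :: PySem.Chars.rstrip t := by
  simp only [PySem.Chars.rstrip, List.reverse_cons, List.dropWhile_append]
  by_cases ht : t.all PySem.Chars.isspace
  · have : List.dropWhile PySem.Chars.isspace t.reverse = [] := by
      rw [List.dropWhile_eq_nil_iff]
      intro x hx; exact (List.all_eq_true.mp ht) x (List.mem_reverse.mp hx)
    rw [this]
    simp [List.dropWhile_cons, ht]
    by_cases hc : PySem.Chars.isspace c <;> simp [hc]
  · have hne : List.dropWhile PySem.Chars.isspace t.reverse ≠ [] := by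
      rw [Ne, List.dropWhile_eq_nil_iff]
      intro hx
      exact ht (List.all_eq_true.mpr (fun x hx' => hx x (List.mem_reverse.mpr hx')))
    simp [ht, List.isEmpty_iff, hne]

theorem pvRstrip_prefix (t : List Char) : PySem.Chars.rstrip t <+: t := by
  have h := List.dropWhile_suffix (l := t.reverse) (p := PySem.Chars.isspace)
  have := List.reverse_prefix.mpr h
  simpa [PySem.Chars.rstrip] using this

theorem pvDropBlank_all_nil {ls : List (List Char)} (h : ls.all pvBlank) :
    ls.dropWhile pvBlank = [] :=
  List.dropWhile_eq_nil_iff.mpr (fun x hx => List.all_eq_true.mp h x hx)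

theorem pvDropBlank_ne_nil {ls : List (List Char)} (h : ¬ ls.all pvBlank = true) :
    ls.dropWhile pvBlank ≠ [] := by
  rw [Ne, List.dropWhile_eq_nil_iff]
  intro hx
  exact h (List.all_eq_true.mpr hx)

theorem pvSL_rstrip (s : List Char) :
    pvSL (PySem.Chars.rstrip s) = (pvHeadR ((pvSL s).reverse.dropWhile pvBlank)).reverse := by
  induction s using pvSL.induct with
  | case1 => simp [PySem.Chars.rstrip, pvSL, pvHeadR]
  | case2 rest ih =>
    have hrs : PySem.Chars.rstrip ('\r' :: '\n' :: rest) =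
        if rest.all PySem.Chars.isspace then [] else '\r' :: '\n' :: PySem.Chars.rstrip rest := by
      rw [pvRstrip_cons]
      by_cases hall : rest.all PySem.Chars.isspace
      · simp [hall, show PySem.Chars.isspace '\r' = true from rfl,
          show PySem.Chars.isspace '\n' = true from rfl]
      · simp [hall, pvRstrip_cons, show PySem.Chars.isspace '\n' = true from rfl]
    rw [pvSL_crlf]
    by_cases hall : rest.all PySem.Chars.isspace
    · rw [hrs, if_pos hall]
      have hb : (((pvSL rest).reverse ++ [([] : List Char)]).all pvBlank) = true := by
        simp [List.all_append, List.all_reverse, pvBlank_all, hall, pvBlank]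
      rw [List.reverse_cons, pvDropBlank_all_nil hb]
      rfl
    · rw [hrs, if_neg hall, pvSL_crlf, ih]
      have hne : (pvSL rest).reverse.dropWhile pvBlank ≠ [] :=
        pvDropBlank_ne_nil (by simp [List.all_reverse, pvBlank_all, hall])
      obtain ⟨d, ds, hd⟩ := List.exists_cons_of_ne_nil hne
      rw [List.reverse_cons, List.dropWhile_append, hd]
      simp [pvHeadR]
  | case3 c rest h hB ih =>
    have hsp : PySem.Chars.isspace c = true := pvIsB_isspace c hB
    rw [pvSL_cons_B c rest h hB, pvRstrip_cons]
    by_cases hall : rest.all PySem.Chars.isspace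
    · rw [if_pos hall, if_pos hsp]
      have hb : (((pvSL rest).reverse ++ [([] : List Char)]).all pvBlank) = true := by
        simp [List.all_append, List.all_reverse, pvBlank_all, hall, pvBlank]
      rw [List.reverse_cons, pvDropBlank_all_nil hb]
      rfl
    · rw [if_neg hall, pvSL_cons_B c (PySem.Chars.rstrip rest)
        (fun r hc hr => by
          obtain ⟨u, hu⟩ := pvRstrip_prefix rest
          exact h (r ++ u) hc (by rw [← hu, hr]; simp)) hB, ih]
      have hne : (pvSL rest).reverse.dropWhile pvBlank ≠ [] :=
        pvDropBlank_ne_nil (by simp [List.all_reverse, pvBlank_all, hall])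
      obtain ⟨d, ds, hd⟩ := List.exists_cons_of_ne_nil hne
      rw [List.reverse_cons, List.dropWhile_append, hd]
      simp [pvHeadR]
  | case4 c rest h hB hnil ih =>
    rcases rest with _ | ⟨x, t⟩
    · rw [pvSL_cons_nB c [] h hB, pvRstrip_cons]
      by_cases hc : PySem.Chars.isspace c
      · simp [pvSL, hc, pvHeadR, List.dropWhile_cons, pvBlank]
      · simp [pvSL, hc, pvHeadR, List.dropWhile_cons, pvBlank, pvSL_cons_nB c [] h hB, pvRstrip_cons]
    · exact absurd hnil (pvSL_cons_ne_nil _ _)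
  | case5 c rest h hB L LS hLS ih =>
    have hSLc : pvSL [c] = [[c]] := by
      rw [pvSL_cons_nB c [] (fun r _ hx => by cases hx) hB]; rfl
    rw [pvSL_cons_nB c rest h hB, hLS, pvRstrip_cons]
    rw [hLS] at ih
    have hblanks : (L.all PySem.Chars.isspace && LS.all pvBlank) = rest.all PySem.Chars.isspace := by
      have := pvBlank_all rest
      rw [hLS] at this
      simpa [pvBlank] using this
    by_cases hall : rest.all PySem.Chars.isspace
    · rw [if_pos hall]
      have hLb : L.all PySem.Chars.isspace = true := by
        rw [hall] at hblanks; exact (Bool.and_eq_true_iff.mp hblanks).1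
      have hLSb : LS.all pvBlank = true := by
        rw [hall] at hblanks; exact (Bool.and_eq_true_iff.mp hblanks).2
      by_cases hc : PySem.Chars.isspace c
      · rw [if_pos hc]
        have hb : (((LS.reverse ++ [c :: L]).all pvBlank) = true) := by
          simp [List.all_append, List.all_reverse, hLSb, pvBlank, hc]
          exact List.all_eq_true.mp hLb
        rw [List.reverse_cons, pvDropBlank_all_nil hb]
        rfl
      · rw [if_neg hc]
        have hdnil : LS.reverse.dropWhile pvBlank = [] :=
          pvDropBlank_all_nil (by simpa [List.all_reverse] using hLSb)
        have hcb : pvBlank (c :: L) = false := by simp [pvBlank, hc]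
        rw [List.reverse_cons, List.dropWhile_append, hdnil, hSLc]
        simp [List.dropWhile_cons, hcb, pvHeadR, pvRstrip_cons, hLb, hc]
    · rw [if_neg hall]
      have hrne : PySem.Chars.rstrip rest ≠ [] := by
        rw [Ne, pvRstrip_nil_iff]; exact hall
      have h' : ∀ (r : List Char), c = '\r' → PySem.Chars.rstrip rest = '\n' :: r → False := by
        intro r hc hr
        obtain ⟨w, hw⟩ := pvRstrip_prefix rest
        exact h (r ++ w) hc (by rw [← hw, hr]; simp)
      rw [pvSL_cons_nB c (PySem.Chars.rstrip rest) h' hB, ih]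
      rw [List.reverse_cons, List.dropWhile_append, List.reverse_cons, List.dropWhile_append]
      by_cases hLSall : LS.all pvBlank
      · have hLnb : L.all PySem.Chars.isspace = false := by
          rcases hq : L.all PySem.Chars.isspace with _ | _
          · rfl
          · rw [hq, hLSall] at hblanks
            exact absurd hblanks.symm (by simpa using hall)
        have hdnil : LS.reverse.dropWhile pvBlank = [] :=
          pvDropBlank_all_nil (by simpa [List.all_reverse] using hLSall)
        have hLb' : pvBlank L = false := by simp [pvBlank]; simpa using hLnb
        have hcLb : pvBlank (c :: L) = false := by
          simp [pvBlank]; intro _; simpa using hLnb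
        rw [hdnil]
        simp [List.dropWhile_cons, hLb', hcLb, pvHeadR, pvRstrip_cons, hLnb]
      · have hne : LS.reverse.dropWhile pvBlank ≠ [] :=
          pvDropBlank_ne_nil (by simpa [List.all_reverse] using hLSall)
        obtain ⟨d, ds, hd⟩ := List.exists_cons_of_ne_nil hne
        rw [hd]
        simp [pvHeadR]

theorem pvAll_dropWhile {p q : Char → Bool} {l : List Char} (h : l.all p = true) :
    (l.dropWhile q).all p = true := by
  rw [List.all_eq_true] at h ⊢
  exact fun x hx => h x ((List.dropWhile_sublist (p := q)).subset hx)

theorem pvLstrip_idem (s : List Char) :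
    PySem.Chars.lstrip (PySem.Chars.lstrip s) = PySem.Chars.lstrip s := by
  simp [PySem.Chars.lstrip, List.dropWhile_idempotent]

theorem pvRstrip_idem (s : List Char) :
    PySem.Chars.rstrip (PySem.Chars.rstrip s) = PySem.Chars.rstrip s := by
  simp [PySem.Chars.rstrip, List.dropWhile_idempotent]

theorem pvLstrip_rstrip (s : List Char) :
    PySem.Chars.lstrip (PySem.Chars.rstrip s) = PySem.Chars.rstrip (PySem.Chars.lstrip s) := by
  induction s with
  | nil => simp [PySem.Chars.lstrip, PySem.Chars.rstrip]
  | cons c t ih =>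
    by_cases hc : PySem.Chars.isspace c <;> by_cases ht : t.all PySem.Chars.isspace
    · have h1 : PySem.Chars.rstrip (PySem.Chars.lstrip t) = [] := by
        rw [pvRstrip_nil_iff]
        exact pvAll_dropWhile ht
      simp [pvRstrip_cons, pvLstrip_cons, hc, ht, h1, PySem.Chars.lstrip]
      exact h1
    · simp [pvRstrip_cons, pvLstrip_cons, hc, ht, ih]
    · simp [pvRstrip_cons, pvLstrip_cons, hc, ht]
    · simp [pvRstrip_cons, pvLstrip_cons, hc, ht]

theorem pvStrip_lstrip (s : List Char) :
    PySem.Chars.strip (PySem.Chars.lstrip s) = PySem.Chars.strip s := by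
  simp [PySem.Chars.strip, pvLstrip_idem]

theorem pvStrip_rstrip (s : List Char) :
    PySem.Chars.strip (PySem.Chars.rstrip s) = PySem.Chars.strip s := by
  simp [PySem.Chars.strip, pvLstrip_rstrip, pvRstrip_idem]

theorem pvStrip_nil_iff (s : List Char) :
    PySem.Chars.strip s = [] ↔ s.all PySem.Chars.isspace := by
  rw [PySem.Chars.strip, pvRstrip_nil_iff]
  constructor
  · intro h
    simp only [PySem.Chars.lstrip] at h
    rw [List.all_eq_true]
    intro x hx
    rw [← List.takeWhile_append_dropWhile (p := PySem.Chars.isspace) (l := s)] at hx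
    rcases List.mem_append.mp hx with h1 | h2
    · exact List.mem_takeWhile_imp h1
    · exact List.all_eq_true.mp h x h2
  · intro h
    exact pvAll_dropWhile h

theorem pvBlank_lstrip (L : List Char) : pvBlank (PySem.Chars.lstrip L) = pvBlank L := by
  rcases h : pvBlank L with _ | _
  · rcases h2 : pvBlank (PySem.Chars.lstrip L) with _ | _
    · rfl
    · exfalso
      have h3 : PySem.Chars.strip L = [] := by
        rw [PySem.Chars.strip, pvRstrip_nil_iff]
        exact h2
      rw [pvStrip_nil_iff] at h3
      rw [pvBlank, h3] at h
      cases h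
  · rw [pvBlank] at h ⊢
    exact pvAll_dropWhile h

theorem pvDropWhile_head_false {α : Type} (p : α → Bool) (l M : List α) (L0 : α)
    (h : l.dropWhile p = L0 :: M) : p L0 = false := by
  have h2 := List.dropWhile_idempotent p l
  rw [h, List.dropWhile_cons] at h2
  by_cases hp : p L0
  · rw [if_pos hp] at h2
    have := congrArg List.length h2
    have h3 := List.length_dropWhile_le (p := p) (l := M)
    simp at this
    omega
  · simpa using hp

theorem pvNext_none {α : Type} (p : α → Bool) (ls : List α)
    (h : ∀ x ∈ ls, p x = false) : ∀ i, pvNext p i ls = none := by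
  induction ls with
  | nil => intro i; rfl
  | cons x t ih =>
    intro i
    rw [pvNext, if_neg (by simp [h x List.mem_cons_self])]
    exact ih (fun y hy => h y (List.mem_cons_of_mem x hy)) (i + 1)

theorem pvNext_spec {α : Type} (p : α → Bool) (xs : List α) (y : α) (ys : List α)
    (hxs : ∀ x ∈ xs, p x = false) (hy : p y = true) :
    ∀ i, pvNext p i (xs ++ y :: ys) = some (i + xs.length) := by
  induction xs with
  | nil => intro i; simp [pvNext, hy]
  | cons x t ih =>
    intro i
    rw [List.cons_append, pvNext, if_neg (by simp [hxs x List.mem_cons_self])]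
    rw [ih (fun z hz => hxs z (List.mem_cons_of_mem x hz)) (i + 1)]
    simp [Nat.add_assoc, Nat.add_comm 1]

theorem pvGetD_append_length {α : Type} (pre : List α) (y : α) (ys : List α) (d : α) :
    (pre ++ y :: ys).getD pre.length d = y := by
  induction pre with
  | nil => rfl
  | cons x t ih => simpa using ih

theorem pvSlice_natCast {α : Type} (ls : List α) (a b : Nat)
    (ha : a ≤ ls.length) (hb : b ≤ ls.length) :
    PySem.List.slice ls (some (a : Int)) (some (b : Int)) = List.take (b - a) (List.drop a ls) := by
  simp only [PySem.List.slice, PySem.List.clampIdx]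
  rw [if_neg (by omega), if_neg (by omega)]
  show List.take (min (b:Int).toNat ls.length - min (a:Int).toNat ls.length) (List.drop (min (a:Int).toNat ls.length) ls) = _
  rw [show min (b:Int).toNat ls.length = b by simp; omega, show min (a:Int).toNat ls.length = a by simp; omega]

theorem pvSlice_one_neg_one {α : Type} (x : α) (mid : List α) (y : α) :
    PySem.List.slice (x :: (mid ++ [y])) (some 1) (some (-1)) = mid := by
  simp [PySem.List.slice, PySem.List.clampIdx]
  rw [if_neg (by omega)]
  rw [Nat.add_sub_cancel]
  exact List.take_left' rfl

theorem pvSlice_single {α : Type} (x : α) :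
    PySem.List.slice [x] (some 1) (some (-1)) = [] := by
  simp [PySem.List.slice, PySem.List.clampIdx]

theorem pvSL_strip (t : List Char) :
    pvSL (PySem.Chars.strip t) =
      (pvHeadR (((pvHeadL ((pvSL t).dropWhile pvBlank)).reverse).dropWhile pvBlank)).reverse := by
  rw [PySem.Chars.strip, pvSL_rstrip, pvSL_lstrip]

theorem pvStrip_empty_iff (ln : String) :
    PySem.Str.strip ln = "" ↔ pvBlank ln.toList = true := by
  rw [← String.toList_inj, PySem.Str.toList_strip, show ("" : String).toList = [] from rfl,
    pvStrip_nil_iff, pvBlank]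

theorem pvPred_eq (ln : String) :
    (decide (PySem.Str.strip ln ≠ "")) = !pvBlank ln.toList := by
  by_cases hb : pvBlank ln.toList
  · simp [hb, (pvStrip_empty_iff ln).mpr hb]
  · have : ¬ PySem.Str.strip ln = "" := fun h => hb ((pvStrip_empty_iff ln).mp h)
    simp [this]
    simpa using hb

theorem pvStrip_strip_toList (Ls Ls' : String) (h : Ls'.toList = PySem.Chars.strip Ls.toList) :
    PySem.Str.strip Ls' = PySem.Str.strip Ls := by
  rw [← String.toList_inj, PySem.Str.toList_strip, PySem.Str.toList_strip, h]
  show PySem.Chars.strip (PySem.Chars.rstrip (PySem.Chars.lstrip Ls.toList)) = _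
  rw [pvStrip_rstrip, pvStrip_lstrip]

theorem pvStrip_lstrip_toList (Ls Ls' : String) (h : Ls'.toList = PySem.Chars.lstrip Ls.toList) :
    PySem.Str.strip Ls' = PySem.Str.strip Ls := by
  rw [← String.toList_inj, PySem.Str.toList_strip, PySem.Str.toList_strip, h, pvStrip_lstrip]

theorem pvStrip_rstrip_toList (Ls Ls' : String) (h : Ls'.toList = PySem.Chars.rstrip Ls.toList) :
    PySem.Str.strip Ls' = PySem.Str.strip Ls := by
  rw [← String.toList_inj, PySem.Str.toList_strip, PySem.Str.toList_strip, h, pvStrip_rstrip]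

theorem pvA_eq_mid (snippet : String) :
    strip_dummy_wrapper_py snippet = pvMid snippet := by
  by_cases hnil : snippet = ""
  · subst hnil; rfl
  have htoinj : Function.Injective String.toList := fun a b h => String.toList_inj.mp h
  have htne : snippet.toList ≠ [] := fun h => hnil (String.toList_inj.mp (by rw [h]; rfl))
  have hmapA : (PySem.Str.splitlines snippet).map String.toList = pvSL snippet.toList := by
    rw [PySem.Str.splitlines_map_toList, pvSplitlines_eq]
  have hSLne : pvSL snippet.toList ≠ [] := by
    rcases hx : snippet.toList with _ | ⟨c, r⟩
    · exact absurd hx htne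
    · exact pvSL_cons_ne_nil c r
  have hlinesne : ¬ PySem.Str.splitlines snippet = [] := by
    intro h; rw [h] at hmapA; exact hSLne (by simpa using hmapA.symm)
  simp only [strip_dummy_wrapper_py, pvMid, if_neg hlinesne]
  by_cases hall : snippet.toList.all PySem.Chars.isspace
  · -- every character is whitespace: A takes the non-class branch and returns strip = ""
    have hallb : ∀ L ∈ pvSL snippet.toList, pvBlank L = true :=
      List.all_eq_true.mp (by rw [pvBlank_all]; exact hall)
    have hpredf : ∀ ln ∈ PySem.Str.splitlines snippet, (decide (PySem.Str.strip ln ≠ "")) = false := by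
      intro ln hln
      rw [pvPred_eq, hallb ln.toList (hmapA ▸ List.mem_map_of_mem hln)]
      rfl
    have hs : PySem.Str.strip snippet = "" := (pvStrip_empty_iff snippet).mpr (by rw [pvBlank]; exact hall)
    rw [if_pos hs]
    rw [pvNext_none _ _ hpredf 0]
    obtain ⟨l0, lrest, hl0⟩ := List.exists_cons_of_ne_nil hlinesne
    have hfirst : PySem.Str.strip (PySem.List.pyGetD (PySem.Str.splitlines snippet) ((((none : Option Nat)).getD 0 : Nat) : Int) "") = "" := by
      rw [Option.getD_none, PySem.List.pyGetD_natCast, hl0]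
      rw [List.getD_cons_zero]
      exact (pvStrip_empty_iff l0).mpr (hallb l0.toList (by rw [← hmapA, hl0]; exact List.mem_map_of_mem List.mem_cons_self))
    rw [hfirst]
    rw [show PySem.Str.isIn "class " "" = false by decide]
    rw [Bool.false_and, if_neg (by simp)]
    exact hs
  · -- some non-whitespace character
    have hsne : ¬ PySem.Str.strip snippet = "" := by
      rw [pvStrip_empty_iff, pvBlank]
      simpa using hall
    rw [if_neg hsne]
    -- list-level decomposition of the lines of the original snippet
    have hDne : (pvSL snippet.toList).dropWhile pvBlank ≠ [] :=
      pvDropBlank_ne_nil (by rw [pvBlank_all]; simpa using hall)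
    obtain ⟨L, M, hD⟩ := List.exists_cons_of_ne_nil hDne
    have hLnb : pvBlank L = false := pvDropWhile_head_false _ _ _ _ hD
    have hlines : (PySem.Str.splitlines snippet).map String.toList =
        (pvSL snippet.toList).takeWhile pvBlank ++ L :: M := by
      rw [hmapA]
      conv_lhs => rw [← List.takeWhile_append_dropWhile (p := pvBlank) (l := pvSL snippet.toList)]
      rw [hD]
    obtain ⟨Fs, rest, hsplit, hFs, hrest⟩ := List.append_eq_map_iff.mp hlines.symm
    obtain ⟨Ls, Ms, hrest2, hLs, hMs⟩ := List.map_eq_cons_iff.mp hrest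
    rw [hrest2] at hsplit
    have hFsb : ∀ x ∈ Fs, pvBlank x.toList = true := by
      intro x hx
      have : x.toList ∈ (pvSL snippet.toList).takeWhile pvBlank := by
        rw [← hFs]; exact List.mem_map_of_mem hx
      exact List.mem_takeWhile_imp this
    have hpredFs : ∀ x ∈ Fs, (decide (PySem.Str.strip x ≠ "")) = false := by
      intro x hx; rw [pvPred_eq, hFsb x hx]; rfl
    have hpredLs : (decide (PySem.Str.strip Ls ≠ "")) = true := by
      rw [pvPred_eq, hLs, hLnb]; rfl
    have hnext1 : pvNext (fun ln => decide (PySem.Str.strip ln ≠ "")) 0 (PySem.Str.splitlines snippet)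
        = some Fs.length := by
      rw [hsplit, pvNext_spec _ _ _ _ hpredFs hpredLs 0, Nat.zero_add]
    have hfirstA : PySem.List.pyGetD (PySem.Str.splitlines snippet) ((Fs.length : Nat) : Int) "" = Ls := by
      rw [PySem.List.pyGetD_natCast, hsplit, pvGetD_append_length]
    rw [hnext1]
    simp only [Option.getD_some]
    rw [hfirstA]
    have hmapB : (PySem.Str.splitlines (PySem.Str.strip snippet)).map String.toList
        = pvSL (PySem.Chars.strip snippet.toList) := by
      rw [PySem.Str.splitlines_map_toList, PySem.Str.toList_strip, pvSplitlines_eq]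
    have hlenA : (PySem.Str.splitlines snippet).length = Fs.length + 1 + Ms.length := by
      rw [hsplit]; simp; omega
    by_cases hMall : M.all pvBlank
    · -- exactly one non-blank line: the stripped text is a single line strip L
      have hMsb : ∀ x ∈ Ms, pvBlank x.toList = true := by
        intro x hx
        exact List.all_eq_true.mp hMall x.toList (by rw [← hMs]; exact List.mem_map_of_mem hx)
      have hpredMs : ∀ x ∈ Ms.reverse, (decide (PySem.Str.strip x ≠ "")) = false := by
        intro x hx; rw [pvPred_eq, hMsb x (List.mem_reverse.mp hx)]; rfl
      have hrev : (PySem.Str.splitlines snippet).reverse = Ms.reverse ++ Ls :: Fs.reverse := by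
        rw [hsplit]; simp
      have hnext2 : pvNext (fun ln => decide (PySem.Str.strip ln ≠ "")) 0
          (PySem.Str.splitlines snippet).reverse = some Ms.length := by
        rw [hrev, pvNext_spec _ _ _ _ hpredMs hpredLs 0, Nat.zero_add, List.length_reverse]
      rw [hnext2]
      simp only [Option.getD_some]
      have hlastIdx : ((PySem.Str.splitlines snippet).length : Int) - 1 - (Ms.length : Nat) =
          ((Fs.length : Nat) : Int) := by
        rw [hlenA]; push_cast; ring
      rw [hlastIdx, hfirstA]
      have h1 : pvBlank (PySem.Chars.lstrip L) = false := by rw [pvBlank_lstrip]; exact hLnb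
      have hMrevb : ∀ x ∈ M.reverse, pvBlank x = true := fun x hx =>
        List.all_eq_true.mp hMall x (List.mem_reverse.mp hx)
      have hSLstrip : pvSL (PySem.Chars.strip snippet.toList) = [PySem.Chars.strip L] := by
        rw [pvSL_strip, hD]
        simp only [pvHeadL, List.reverse_cons, List.dropWhile_append,
          pvDropBlank_all_nil (List.all_eq_true.mpr hMrevb), List.isEmpty_nil, if_true,
          List.dropWhile_cons, h1, Bool.false_eq_true, if_false, List.dropWhile_nil, pvHeadR]
        rfl
      obtain ⟨Ls', rest', hlB, hLs', hrest'⟩ := List.map_eq_cons_iff.mp (hmapB.trans hSLstrip)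
      have hrest'nil : rest' = [] := by simpa using hrest'
      rw [hrest'nil] at hlB
      rw [hlB]
      have hget0 : PySem.List.pyGetD [Ls'] (0 : Int) "" = Ls' := PySem.List.pyGetD_zero_cons Ls' [] ""
      have hgetneg : PySem.List.pyGetD [Ls'] (-1 : Int) "" = Ls' := by
        simpa using PySem.List.pyGetD_neg_one_append_singleton (xs := ([] : List String)) (x := Ls') (d := "")
      rw [hget0, hgetneg]
      have hstripLs' : PySem.Str.strip Ls' = PySem.Str.strip Ls :=
        pvStrip_strip_toList Ls Ls' (by rw [hLs', hLs])
      rw [hstripLs']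
      by_cases hcond : (PySem.Str.isIn "class " (PySem.Str.strip Ls) && PySem.Str.strip Ls == "}") = true
      · rw [if_pos hcond, if_pos hcond]
        rw [show ((Fs.length : Nat) : Int) + 1 = (((Fs.length + 1 : Nat)) : Int) by push_cast; ring]
        rw [pvSlice_natCast _ _ _ (by rw [hlenA]; omega) (by rw [hlenA]; omega)]
        rw [pvSlice_single]
        rw [show Fs.length - (Fs.length + 1) = 0 from by omega, List.take_zero]
      · rw [if_neg hcond, if_neg hcond]
    · -- several non-blank lines
      have hMne : M.reverse.dropWhile pvBlank ≠ [] :=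
        pvDropBlank_ne_nil (by rw [List.all_reverse]; exact hMall)
      obtain ⟨d, ds, hd⟩ := List.exists_cons_of_ne_nil hMne
      have hdnb : pvBlank d = false := pvDropWhile_head_false _ _ _ _ hd
      have hMrev : M.reverse = M.reverse.takeWhile pvBlank ++ d :: ds := by
        conv_lhs => rw [← List.takeWhile_append_dropWhile (p := pvBlank) (l := M.reverse)]
        rw [hd]
      have hM : M = ds.reverse ++ d :: (M.reverse.takeWhile pvBlank).reverse := by
        have h2 := congrArg List.reverse hMrev
        simpa using h2
      obtain ⟨Ks, rest2, hMsplit, hKs, hrest2'⟩ := List.append_eq_map_iff.mp (hMs.trans hM).symm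
      obtain ⟨Ds, Bs, hrest3, hDs, hBs⟩ := List.map_eq_cons_iff.mp hrest2'
      rw [hrest3] at hMsplit
      have hBsb : ∀ x ∈ Bs, pvBlank x.toList = true := by
        intro x hx
        have hxM : x.toList ∈ (M.reverse.takeWhile pvBlank).reverse := by
          rw [← hBs]; exact List.mem_map_of_mem hx
        exact List.mem_takeWhile_imp (List.mem_reverse.mp hxM)
      have hpredBs : ∀ x ∈ Bs.reverse, (decide (PySem.Str.strip x ≠ "")) = false := by
        intro x hx; rw [pvPred_eq, hBsb x (List.mem_reverse.mp hx)]; rfl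
      have hpredDs : (decide (PySem.Str.strip Ds ≠ "")) = true := by
        rw [pvPred_eq, hDs, hdnb]; rfl
      have hrev : (PySem.Str.splitlines snippet).reverse =
          Bs.reverse ++ Ds :: (Ks.reverse ++ Ls :: Fs.reverse) := by
        rw [hsplit, hMsplit]; simp
      have hnext2 : pvNext (fun ln => decide (PySem.Str.strip ln ≠ "")) 0
          (PySem.Str.splitlines snippet).reverse = some Bs.length := by
        rw [hrev, pvNext_spec _ _ _ _ hpredBs hpredDs 0, Nat.zero_add, List.length_reverse]
      rw [hnext2]
      simp only [Option.getD_some]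
      have hlenMs : Ms.length = Ks.length + 1 + Bs.length := by
        rw [hMsplit]; simp; omega
      have hlastIdx : ((PySem.Str.splitlines snippet).length : Int) - 1 - (Bs.length : Nat) =
          (((Fs.length + 1 + Ks.length : Nat)) : Int) := by
        rw [hlenA, hlenMs]; push_cast; ring
      rw [hlastIdx]
      have hlastA : PySem.List.pyGetD (PySem.Str.splitlines snippet)
          (((Fs.length + 1 + Ks.length : Nat)) : Int) "" = Ds := by
        rw [PySem.List.pyGetD_natCast, hsplit, hMsplit]
        rw [show Fs ++ Ls :: (Ks ++ Ds :: Bs) = (Fs ++ Ls :: Ks) ++ Ds :: Bs by simp]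
        rw [show Fs.length + 1 + Ks.length = (Fs ++ Ls :: Ks).length by simp; omega]
        exact pvGetD_append_length _ _ _ _
      rw [hlastA]
      have hBlall : ∀ x ∈ M.reverse.takeWhile pvBlank, pvBlank x = true :=
        fun x hx => List.mem_takeWhile_imp hx
      have hSLstrip : pvSL (PySem.Chars.strip snippet.toList) =
          PySem.Chars.lstrip L :: (ds.reverse ++ [PySem.Chars.rstrip d]) := by
        rw [pvSL_strip, hD]
        simp only [pvHeadL, List.reverse_cons]
        rw [hMrev, List.append_assoc, List.dropWhile_append,
          pvDropBlank_all_nil (List.all_eq_true.mpr hBlall)]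
        simp only [List.isEmpty_nil, if_true, List.cons_append]
        rw [List.dropWhile_cons, if_neg (by simp [hdnb])]
        simp [pvHeadR]
      obtain ⟨Ls', restB, hlB, hLs', hrestB⟩ := List.map_eq_cons_iff.mp (hmapB.trans hSLstrip)
      obtain ⟨Js, restB2, hJsplit, hJs, hrestB2⟩ := List.append_eq_map_iff.mp hrestB.symm
      obtain ⟨Ds', Bs2, hr3, hDs', hB2⟩ := List.map_eq_cons_iff.mp hrestB2
      have hBs2nil : Bs2 = [] := by simpa using hB2
      rw [hBs2nil] at hr3
      rw [hr3] at hJsplit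
      rw [hJsplit] at hlB
      rw [hlB]
      have hget0 : PySem.List.pyGetD (Ls' :: (Js ++ [Ds'])) (0 : Int) "" = Ls' :=
        PySem.List.pyGetD_zero_cons _ _ ""
      have hgetneg : PySem.List.pyGetD (Ls' :: (Js ++ [Ds'])) (-1 : Int) "" = Ds' := by
        simpa using PySem.List.pyGetD_neg_one_append_singleton (xs := Ls' :: Js) (x := Ds') (d := "")
      rw [hget0, hgetneg]
      have hstripLs' : PySem.Str.strip Ls' = PySem.Str.strip Ls :=
        pvStrip_lstrip_toList Ls Ls' (by rw [hLs', hLs])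
      have hstripDs' : PySem.Str.strip Ds' = PySem.Str.strip Ds :=
        pvStrip_rstrip_toList Ds Ds' (by rw [hDs', hDs])
      rw [hstripLs', hstripDs']
      by_cases hcond : (PySem.Str.isIn "class " (PySem.Str.strip Ls) && PySem.Str.strip Ds == "}") = true
      · rw [if_pos hcond, if_pos hcond]
        rw [show ((Fs.length : Nat) : Int) + 1 = (((Fs.length + 1 : Nat)) : Int) by push_cast; ring]
        rw [pvSlice_natCast _ _ _ (by rw [hlenA, hlenMs]; omega) (by rw [hlenA, hlenMs]; omega)]
        rw [pvSlice_one_neg_one]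
        have hJK : Js = Ks :=
          (List.map_injective_iff.mpr htoinj) (hJs.trans hKs.symm)
        rw [hJK]
        rw [hsplit, hMsplit]
        rw [show Fs ++ Ls :: (Ks ++ Ds :: Bs) = (Fs ++ [Ls]) ++ (Ks ++ Ds :: Bs) by simp]
        rw [show Fs.length + 1 = (Fs ++ [Ls]).length by simp]
        rw [List.drop_left]
        rw [show (Fs ++ [Ls]).length + Ks.length - (Fs ++ [Ls]).length = Ks.length by omega]
        rw [List.take_left' rfl]
      · rw [if_neg hcond, if_neg hcond]

-- ===== new machinery: pvMid = alt =====

-- str.replace as a fuel-free recursion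
def pvRep (old new : List Char) : List Char → List Char
  | [] => []
  | c :: t =>
    if old.isPrefixOf (c :: t) then new ++ pvRep old new (t.drop (old.length - 1))
    else c :: pvRep old new t
termination_by l => l.length
decreasing_by
  · simpa using Nat.lt_succ_of_le (List.length_drop_le _ _)
  · simp

theorem pvRep_go_eq (old new : List Char) (hold : old ≠ []) :
    ∀ (fuel : Nat) (l acc : List Char), l.length ≤ fuel →
      PySem.Chars.replace.go old new fuel l acc = acc.reverse ++ pvRep old new l := by
  intro fuel
  induction fuel with
  | zero =>
    intro l acc hl
    have hlnil : l = [] := List.eq_nil_of_length_eq_zero (Nat.le_zero.mp hl)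
    subst hlnil
    simp [PySem.Chars.replace.go, pvRep]
  | succ f ih =>
    intro l acc hl
    rcases l with _ | ⟨c, t⟩
    · simp [PySem.Chars.replace.go, pvRep]
    · obtain ⟨o, os, ho⟩ := List.exists_cons_of_ne_nil hold
      by_cases hp : old.isPrefixOf (c :: t) = true
      · have hgo : PySem.Chars.replace.go old new (f + 1) (c :: t) acc
            = PySem.Chars.replace.go old new f (List.drop old.length (c :: t)) (new.reverse ++ acc) := by
          simp [PySem.Chars.replace.go, hp]
        have hdrop : List.drop old.length (c :: t) = t.drop (old.length - 1) := by
          subst ho; simp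
        have hlen : (t.drop (old.length - 1)).length ≤ f := by
          simp only [List.length_cons] at hl
          simp only [List.length_drop]
          omega
        rw [hgo, hdrop, ih _ _ hlen]
        have hrep : pvRep old new (c :: t) = new ++ pvRep old new (t.drop (old.length - 1)) := by
          simp only [pvRep]
          rw [if_pos hp]
        rw [hrep]
        simp [List.reverse_append]
      · have hgo : PySem.Chars.replace.go old new (f + 1) (c :: t) acc
            = PySem.Chars.replace.go old new f t (c :: acc) := by
          simp [PySem.Chars.replace.go, hp]
        have hlen : t.length ≤ f := by
          simp only [List.length_cons] at hl
          omega
        rw [hgo, ih _ _ hlen]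
        have hrep : pvRep old new (c :: t) = c :: pvRep old new t := by
          simp only [pvRep]
          rw [if_neg hp]
        rw [hrep]
        simp

theorem pvReplace_eq (u old new : List Char) (hold : old ≠ []) :
    PySem.Chars.replace u old new = pvRep old new u := by
  have h1 : old.isEmpty = false := by simp [List.isEmpty_iff, hold]
  unfold PySem.Chars.replace
  rw [h1]
  simp only [Bool.false_eq_true, if_false]
  rw [pvRep_go_eq old new hold u.length u [] le_rfl]
  simp

def pvCR (c : Char) : Char := if c = '\r' then '\n' else c

theorem pvRep_cr (v : List Char) : pvRep ['\r'] ['\n'] v = v.map pvCR := by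
  induction v with
  | nil => simp [pvRep]
  | cons c t ih =>
    by_cases hc : c = '\r'
    · subst hc
      have hp : (['\r'] : List Char).isPrefixOf ('\r' :: t) = true := by
        rw [List.isPrefixOf_iff_prefix, List.cons_prefix_cons]
        exact ⟨rfl, List.nil_prefix⟩
      simp only [pvRep]
      rw [if_pos hp]
      simp [pvCR, ih]
    · have hp : ¬ ((['\r'] : List Char).isPrefixOf (c :: t) = true) := by
        rw [List.isPrefixOf_iff_prefix, List.cons_prefix_cons]
        rintro ⟨h1, -⟩
        exact hc h1.symm
      simp only [pvRep]
      rw [if_neg hp]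
      simp [pvCR, hc, ih]

theorem pvRep_crlf_crlf (r : List Char) :
    pvRep ['\r', '\n'] ['\n'] ('\r' :: '\n' :: r) = '\n' :: pvRep ['\r', '\n'] ['\n'] r := by
  have hp : (['\r', '\n'] : List Char).isPrefixOf ('\r' :: '\n' :: r) = true := by
    rw [List.isPrefixOf_iff_prefix, List.cons_prefix_cons, List.cons_prefix_cons]
    exact ⟨rfl, rfl, List.nil_prefix⟩
  simp only [pvRep]
  rw [if_pos hp]
  simp

theorem pvRep_crlf_cons (c : Char) (rest : List Char)
    (h : ∀ (r : List Char), c = '\r' → rest = '\n' :: r → False) :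
    pvRep ['\r', '\n'] ['\n'] (c :: rest) = c :: pvRep ['\r', '\n'] ['\n'] rest := by
  have hp : ¬ ((['\r', '\n'] : List Char).isPrefixOf (c :: rest) = true) := by
    rw [List.isPrefixOf_iff_prefix, List.cons_prefix_cons]
    rintro ⟨h1, h2⟩
    obtain ⟨w, hw⟩ := h2
    exact h w h1.symm (by simpa using hw.symm)
  simp only [pvRep]
  rw [if_neg hp]

theorem pvIL_nil (sep : List Char) : List.intercalate sep ([] : List (List Char)) = [] := by
  simp [List.intercalate]

theorem pvIL_single (sep x : List Char) : List.intercalate sep [x] = x := by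
  simp [List.intercalate]

theorem pvIL_cons2 (sep x y : List Char) (l : List (List Char)) :
    List.intercalate sep (x :: y :: l) = x ++ sep ++ List.intercalate sep (y :: l) := by
  simp [List.intercalate, List.intersperse]

theorem pvIL_cons (sep x : List Char) (ks : List (List Char)) (h : ks ≠ []) :
    List.intercalate sep (x :: ks) = x ++ sep ++ List.intercalate sep ks := by
  rcases ks with _ | ⟨y, l⟩
  · exact absurd rfl h
  · exact pvIL_cons2 sep x y l

theorem pvIL_concat (sep : List Char) (ks : List (List Char)) (z : List Char) (h : ks ≠ []) :
    List.intercalate sep (ks ++ [z]) = List.intercalate sep ks ++ sep ++ z := by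
  induction ks with
  | nil => exact absurd rfl h
  | cons k kr ih =>
    rcases kr with _ | ⟨k2, kr2⟩
    · simp [pvIL_cons2, pvIL_single]
    · have ih' := ih (List.cons_ne_nil _ _)
      rw [List.cons_append] at ih'
      rw [List.cons_append, List.cons_append, pvIL_cons2, ih', pvIL_cons2]
      simp [List.append_assoc]

theorem pvChar_eq_nl {c : Char} (h : c.toNat = 10) : c = '\n' := by
  have hv : c.val.toNat = ('\n' : Char).val.toNat := h
  exact Char.ext (UInt32.toNat_inj.mp hv)

theorem pvChar_eq_cr {c : Char} (h : c.toNat = 13) : c = '\r' := by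
  have hv : c.val.toNat = ('\r' : Char).val.toNat := h
  exact Char.ext (UInt32.toNat_inj.mp hv)

theorem pvSL_no_boundary (u : List Char) :
    ∀ L ∈ pvSL u, '\n' ∉ L ∧ '\r' ∉ L := by
  induction u using pvSL.induct with
  | case1 => simp [pvSL]
  | case2 rest ih =>
    rw [pvSL_crlf]
    intro L hL
    rcases List.mem_cons.mp hL with hL | hL
    · subst hL; simp
    · exact ih L hL
  | case3 c rest h hB ih =>
    rw [pvSL_cons_B c rest h hB]
    intro L hL
    rcases List.mem_cons.mp hL with hL | hL
    · subst hL; simp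
    · exact ih L hL
  | case4 c rest h hB hnil ih =>
    have hrest : rest = [] := by
      rcases rest with _ | ⟨x, t⟩
      · rfl
      · exact absurd hnil (pvSL_cons_ne_nil _ _)
    subst hrest
    have hSLu : pvSL [c] = [[c]] := by
      rw [pvSL_cons_nB c [] h hB]; rfl
    rw [hSLu]
    intro L hL
    rcases List.mem_singleton.mp hL with hL
    subst hL
    refine ⟨?_, ?_⟩ <;> intro hm
    · rcases List.mem_singleton.mp hm with h'
      exact hB (h' ▸ (by decide : pvIsB '\n' = true))
    · rcases List.mem_singleton.mp hm with h'
      exact hB (h' ▸ (by decide : pvIsB '\r' = true))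
  | case5 c rest h hB L LS hLS ih =>
    have hSLu : pvSL (c :: rest) = (c :: L) :: LS := by
      rw [pvSL_cons_nB c rest h hB, hLS]
    rw [hSLu]
    intro L' hL'
    rcases List.mem_cons.mp hL' with hL' | hL'
    · subst hL'
      have hLmem : L ∈ pvSL rest := by rw [hLS]; exact List.mem_cons_self
      have hLn := ih L hLmem
      refine ⟨?_, ?_⟩ <;> intro hm
      · rcases List.mem_cons.mp hm with h' | h'
        · exact hB (h' ▸ (by decide : pvIsB '\n' = true))
        · exact hLn.1 h'
      · rcases List.mem_cons.mp hm with h' | h'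
        · exact hB (h' ▸ (by decide : pvIsB '\r' = true))
        · exact hLn.2 h'
    · exact ih L' (by rw [hLS]; exact List.mem_cons_of_mem _ hL')

theorem pvGetLast?_cons_ne {c : Char} {rest : List Char} (h : rest ≠ []) :
    (c :: rest).getLast? = rest.getLast? := by
  rcases rest with _ | ⟨x, t⟩
  · exact absurd rfl h
  · exact List.getLast?_cons_cons

theorem pvNorm_eq : ∀ (u : List Char), (∀ c ∈ u, pvDomChar c = true) →
    (u.getLast? ≠ some '\n' ∧ u.getLast? ≠ some '\r') →
    (pvRep ['\r', '\n'] ['\n'] u).map pvCR = List.intercalate ['\n'] (pvSL u) := by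
  intro u
  induction u using pvSL.induct with
  | case1 =>
    intro _ _
    simp [pvRep, pvSL, pvIL_nil]
  | case2 rest ih =>
    intro hdom htr
    have hrne : rest ≠ [] := by
      intro hr; subst hr; exact htr.1 rfl
    have hdom' : ∀ c ∈ rest, pvDomChar c = true := fun c hc => hdom c (by simp [hc])
    have htr' : rest.getLast? ≠ some '\n' ∧ rest.getLast? ≠ some '\r' := by
      rwa [pvGetLast?_cons_ne (by simp), pvGetLast?_cons_ne hrne] at htr
    have hih := ih hdom' htr'
    obtain ⟨x, t, hx⟩ := List.exists_cons_of_ne_nil hrne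
    obtain ⟨P, PS, hP⟩ := List.exists_cons_of_ne_nil
      (show pvSL rest ≠ [] by rw [hx]; exact pvSL_cons_ne_nil _ _)
    rw [pvRep_crlf_crlf, pvSL_crlf, hP, pvIL_cons _ _ _ (by simp)]
    rw [hP] at hih
    simp [pvCR, hih]
  | case3 c rest h hB ih =>
    intro hdom htr
    have hd := hdom c (by simp)
    have h1013 : c.toNat = 10 ∨ c.toNat = 13 := by
      simp [pvIsB] at hB
      simp [pvDomChar] at hd
      omega
    have hrne : rest ≠ [] := by
      intro hr; subst hr
      rcases h1013 with h10 | h13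
      · exact htr.1 (by rw [pvChar_eq_nl h10]; rfl)
      · exact htr.2 (by rw [pvChar_eq_cr h13]; rfl)
    have hdom' : ∀ c' ∈ rest, pvDomChar c' = true := fun c' hc => hdom c' (by simp [hc])
    have htr' : rest.getLast? ≠ some '\n' ∧ rest.getLast? ≠ some '\r' := by
      rwa [pvGetLast?_cons_ne hrne] at htr
    have hih := ih hdom' htr'
    obtain ⟨x, t, hx⟩ := List.exists_cons_of_ne_nil hrne
    obtain ⟨P, PS, hP⟩ := List.exists_cons_of_ne_nil
      (show pvSL rest ≠ [] by rw [hx]; exact pvSL_cons_ne_nil _ _)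
    have hcCR : pvCR c = '\n' := by
      rcases h1013 with h10 | h13
      · rw [pvChar_eq_nl h10]; rfl
      · rw [pvChar_eq_cr h13]; rfl
    rw [pvRep_crlf_cons c rest h, pvSL_cons_B c rest h hB, hP, pvIL_cons _ _ _ (by simp)]
    rw [hP] at hih
    simp [hcCR, hih]
  | case4 c rest h hB hnil ih =>
    intro hdom htr
    have hrest : rest = [] := by
      rcases rest with _ | ⟨x, t⟩
      · rfl
      · exact absurd hnil (pvSL_cons_ne_nil _ _)
    subst hrest
    have hSLu : pvSL [c] = [[c]] := by
      rw [pvSL_cons_nB c [] h hB]; rfl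
    have hcne : c ≠ '\r' := fun hc => hB (hc ▸ (by decide : pvIsB '\r' = true))
    rw [pvRep_crlf_cons c [] h, hSLu, pvIL_single]
    simp [pvRep, pvCR, hcne]
  | case5 c rest h hB L LS hLS ih =>
    intro hdom htr
    have hrne : rest ≠ [] := by
      intro hr; subst hr
      simp [pvSL] at hLS
    have hdom' : ∀ c' ∈ rest, pvDomChar c' = true := fun c' hc => hdom c' (by simp [hc])
    have htr' : rest.getLast? ≠ some '\n' ∧ rest.getLast? ≠ some '\r' := by
      rwa [pvGetLast?_cons_ne hrne] at htr
    have hih := ih hdom' htr'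
    have hSLu : pvSL (c :: rest) = (c :: L) :: LS := by
      rw [pvSL_cons_nB c rest h hB, hLS]
    have hcne : c ≠ '\r' := fun hc => hB (hc ▸ (by decide : pvIsB '\r' = true))
    have hint : List.intercalate ['\n'] ((c :: L) :: LS) = c :: List.intercalate ['\n'] (L :: LS) := by
      rcases LS with _ | ⟨L2, LS2⟩
      · simp [pvIL_single]
      · rw [pvIL_cons2, pvIL_cons2]
        simp
    rw [pvRep_crlf_cons c rest h, hSLu, hint]
    rw [hLS] at hih
    rw [← hih]
    simp [pvCR, hcne]

theorem pvSingle_prefix (a : Char) (w : List Char) : [a] <+: w ↔ w.head? = some a := by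
  rcases w with _ | ⟨b, t⟩
  · simp
  · simp [List.cons_prefix_cons, eq_comm]

theorem pvFind_newline (xs ys : List Char) (hxs : '\n' ∉ xs) :
    PySem.Chars.find (xs ++ '\n' :: ys) ['\n'] = (xs.length : Int) := by
  have hinf : (['\n'] : List Char) <:+: (xs ++ '\n' :: ys) := ⟨xs, ys, by simp⟩
  have h0 : 0 ≤ PySem.Chars.find (xs ++ '\n' :: ys) ['\n'] :=
    (PySem.Chars.find_nonneg_iff _ _).mpr hinf
  obtain ⟨hpre, hmin⟩ := PySem.Chars.find_spec h0
  have hat : ((xs ++ '\n' :: ys).drop xs.length) = '\n' :: ys := List.drop_left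
  have hle : (PySem.Chars.find (xs ++ '\n' :: ys) ['\n']).toNat ≤ xs.length := by
    by_contra hgt
    exact hmin xs.length (by omega) (by rw [hat]; exact (pvSingle_prefix _ _).mpr rfl)
  have hge : ¬ (PySem.Chars.find (xs ++ '\n' :: ys) ['\n']).toNat < xs.length := by
    intro hlt
    have hh : ((xs ++ '\n' :: ys).drop (PySem.Chars.find (xs ++ '\n' :: ys) ['\n']).toNat).head?
        = some '\n' := (pvSingle_prefix _ _).mp hpre
    rw [List.head?_drop, List.getElem?_append_left hlt] at hh
    exact hxs (List.mem_of_getElem? hh)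
  have htn := Int.toNat_of_nonneg h0
  omega

theorem pvRfind_go_spec (s sub : List Char) : ∀ (k j : Nat),
    sub.isPrefixOf (s.drop j) = true → j ≤ k →
    (∀ i, j < i → i ≤ k → sub.isPrefixOf (s.drop i) = false) →
    PySem.Chars.rfind.go s sub k = (j : Int) := by
  intro k
  induction k with
  | zero =>
    intro j hj hjk _
    have hj0 : j = 0 := Nat.le_zero.mp hjk
    subst hj0
    simp only [List.drop_zero] at hj
    simp [PySem.Chars.rfind.go, hj]
  | succ k ih =>
    intro j hj hjk hmax
    by_cases hje : j = k + 1
    · subst hje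
      simp [PySem.Chars.rfind.go, hj]
    · have hjk' : j ≤ k := by omega
      have hk1 : sub.isPrefixOf (s.drop (k + 1)) = false := hmax (k + 1) (by omega) le_rfl
      have hgo : PySem.Chars.rfind.go s sub (k + 1)
          = if sub.isPrefixOf (s.drop (k + 1)) = true then ((k + 1 : Nat) : Int)
            else PySem.Chars.rfind.go s sub k := by
        simp [PySem.Chars.rfind.go]
      rw [hgo, hk1]
      simp only [Bool.false_eq_true, if_false]
      exact ih j hj hjk' (fun i h1 h2 => hmax i h1 (by omega))

theorem pvRfind_newline (xs ys : List Char) (hys : '\n' ∉ ys) :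
    PySem.Chars.rfind (xs ++ '\n' :: ys) ['\n'] = (xs.length : Int) := by
  have hj : (['\n'] : List Char).isPrefixOf ((xs ++ '\n' :: ys).drop xs.length) = true := by
    rw [List.drop_left, List.isPrefixOf_iff_prefix]
    exact (pvSingle_prefix _ _).mpr rfl
  have hmax : ∀ i, xs.length < i → i ≤ (xs ++ '\n' :: ys).length →
      (['\n'] : List Char).isPrefixOf ((xs ++ '\n' :: ys).drop i) = false := by
    intro i h1 _
    rcases hb : (['\n'] : List Char).isPrefixOf ((xs ++ '\n' :: ys).drop i) with _ | _
    · rfl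
    · exfalso
      rw [List.isPrefixOf_iff_prefix] at hb
      have hh := (pvSingle_prefix _ _).mp hb
      rw [List.head?_drop] at hh
      have h2' : (xs ++ '\n' :: ys)[i]? = ('\n' :: ys)[i - xs.length]? :=
        List.getElem?_append_right (by omega)
      obtain ⟨m, hm⟩ : ∃ m, i - xs.length = m + 1 := ⟨i - xs.length - 1, by omega⟩
      rw [h2', hm, List.getElem?_cons_succ] at hh
      exact hys (List.mem_of_getElem? hh)
  have hrf : PySem.Chars.rfind (xs ++ '\n' :: ys) ['\n']
      = PySem.Chars.rfind.go (xs ++ '\n' :: ys) ['\n'] (xs ++ '\n' :: ys).length := rfl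
  rw [hrf]
  exact pvRfind_go_spec _ _ _ _ hj (by simp) hmax

theorem pvMem_strip (u : List Char) (c : Char) (h : c ∈ PySem.Chars.strip u) : c ∈ u := by
  have h1 : c ∈ PySem.Chars.lstrip u :=
    (pvRstrip_prefix (PySem.Chars.lstrip u)).sublist.subset
      (show c ∈ PySem.Chars.rstrip (PySem.Chars.lstrip u) from h)
  exact (List.dropWhile_sublist (p := PySem.Chars.isspace)).subset
    (show c ∈ List.dropWhile PySem.Chars.isspace u from h1)

theorem pvRstrip_strip (u : List Char) :
    PySem.Chars.rstrip (PySem.Chars.strip u) = PySem.Chars.strip u := by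
  show PySem.Chars.rstrip (PySem.Chars.rstrip (PySem.Chars.lstrip u)) = _
  rw [pvRstrip_idem]
  rfl

theorem pvRstrip_concat_space (v : List Char) (c : Char) (hc : PySem.Chars.isspace c = true) :
    PySem.Chars.rstrip (v ++ [c]) = PySem.Chars.rstrip v := by
  simp [PySem.Chars.rstrip, List.reverse_append, List.dropWhile_cons, hc]

theorem pvStrip_last_not_sep (u : List Char) (hr : PySem.Chars.rstrip u = u) :
    u.getLast? ≠ some '\n' ∧ u.getLast? ≠ some '\r' := by
  constructor
  · intro hlast
    obtain ⟨v, hv⟩ := List.getLast?_eq_some_iff.mp hlast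
    rw [hv, pvRstrip_concat_space v '\n' (by decide)] at hr
    have h1 := (pvRstrip_prefix v).length_le
    have h2 := congrArg List.length hr
    simp at h2
    omega
  · intro hlast
    obtain ⟨v, hv⟩ := List.getLast?_eq_some_iff.mp hlast
    rw [hv, pvRstrip_concat_space v '\r' (by decide)] at hr
    have h1 := (pvRstrip_prefix v).length_le
    have h2 := congrArg List.length hr
    simp at h2
    omega

theorem pvMid_eq_alt (snippet : String) (hdom : Dom_strip_dummy_wrapper_py snippet) :
    pvMid snippet = strip_dummy_wrapper_py_alt snippet := by
  by_cases hs0 : PySem.Str.strip snippet = ""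
  · simp only [pvMid, strip_dummy_wrapper_py_alt, if_pos hs0]
  · have hdom' : snippet.toList.all pvDomChar = true := hdom
    simp only [pvMid, strip_dummy_wrapper_py_alt, if_neg hs0]
    set s := PySem.Str.strip snippet with hsdef
    have hu : s.toList = PySem.Chars.strip snippet.toList := PySem.Str.toList_strip snippet
    have hdomu : ∀ c ∈ s.toList, pvDomChar c = true := by
      intro c hc
      exact List.all_eq_true.mp hdom' c (pvMem_strip _ _ (by rw [← hu]; exact hc))
    have hrfix : PySem.Chars.rstrip s.toList = s.toList := by rw [hu]; exact pvRstrip_strip _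
    have htr := pvStrip_last_not_sep s.toList hrfix
    have hmap : (PySem.Str.splitlines s).map String.toList = pvSL s.toList := by
      rw [PySem.Str.splitlines_map_toList, pvSplitlines_eq]
    have ht : (PySem.Str.replace (PySem.Str.replace s "\r\n" "\n") "\r" "\n").toList
        = List.intercalate ['\n'] (pvSL s.toList) := by
      rw [PySem.Str.toList_replace, PySem.Str.toList_replace,
        show ("\r\n" : String).toList = ['\r', '\n'] from rfl,
        show ("\r" : String).toList = ['\r'] from rfl,
        show ("\n" : String).toList = ['\n'] from rfl,
        pvReplace_eq _ _ _ (by simp), pvReplace_eq _ _ _ (by simp), pvRep_cr]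
      exact pvNorm_eq s.toList hdomu htr
    have hsne : s ≠ "" := hs0
    have hune : s.toList ≠ [] := fun h => hsne (String.toList_inj.mp (by rw [h]; rfl))
    have hlinesne : PySem.Str.splitlines s ≠ [] := by
      intro h
      have hmm := hmap
      rw [h] at hmm
      rcases hx : s.toList with _ | ⟨c, r⟩
      · exact hune hx
      · rw [hx] at hmm
        exact pvSL_cons_ne_nil c r (by simpa using hmm.symm)
    obtain ⟨l0, rest0, hl⟩ := List.exists_cons_of_ne_nil hlinesne
    rcases rest0 with _ | ⟨r1, rs⟩
    · -- a single line after stripping: the normalized text has no newline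
      have hpv : pvSL s.toList = [l0.toList] := by rw [← hmap, hl]; rfl
      have htl : (PySem.Str.replace (PySem.Str.replace s "\r\n" "\n") "\r" "\n").toList = l0.toList := by
        rw [ht, hpv, pvIL_single]
      have hnb := pvSL_no_boundary s.toList l0.toList (by rw [hpv]; exact List.mem_cons_self)
      have hfind : PySem.Str.find (PySem.Str.replace (PySem.Str.replace s "\r\n" "\n") "\r" "\n") "\n" = -1 := by
        rw [PySem.Str.find_eq, show ("\n" : String).toList = ['\n'] from rfl, htl,
          PySem.Chars.find_eq_neg_one_iff]
        rintro ⟨p, q, hpq⟩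
        exact hnb.1 (by rw [← hpq]; simp)
      rw [if_pos hfind, hl]
      rw [show PySem.List.pyGetD [l0] (0 : Int) "" = l0 from PySem.List.pyGetD_zero_cons l0 [] ""]
      rw [show PySem.List.pyGetD [l0] (-1 : Int) "" = l0 from by
        simpa using PySem.List.pyGetD_neg_one_append_singleton (xs := ([] : List String)) (x := l0) (d := "")]
      by_cases hq : PySem.Str.strip l0 = "}"
      · rw [hq, show PySem.Str.isIn "class " "}" = false from by decide]
        simp
      · rw [show (PySem.Str.strip l0 == "}") = false from by simpa using hq, Bool.and_false]
        simp
    · -- at least two lines after stripping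
      obtain ⟨midls, ln, hrest⟩ : ∃ midls ln, r1 :: rs = midls ++ [ln] :=
        ⟨(r1 :: rs).dropLast, (r1 :: rs).getLast (by simp), by
          rw [List.dropLast_append_getLast]⟩
      rw [hrest] at hl
      have hpv : pvSL s.toList = l0.toList :: (midls.map String.toList ++ [ln.toList]) := by
        rw [← hmap, hl]; simp
      have hnL0 : '\n' ∉ l0.toList :=
        (pvSL_no_boundary s.toList l0.toList (by rw [hpv]; exact List.mem_cons_self)).1
      have hnLn : '\n' ∉ ln.toList :=
        (pvSL_no_boundary s.toList ln.toList (by rw [hpv]; simp)).1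
      have hil1 : (PySem.Str.replace (PySem.Str.replace s "\r\n" "\n") "\r" "\n").toList
          = l0.toList ++ '\n' :: List.intercalate ['\n'] (midls.map String.toList ++ [ln.toList]) := by
        rw [ht, hpv, pvIL_cons _ _ _ (by simp)]
        simp
      have hW : (PySem.Str.replace (PySem.Str.replace s "\r\n" "\n") "\r" "\n").toList
          = List.intercalate ['\n'] (l0.toList :: midls.map String.toList) ++ '\n' :: ln.toList := by
        rw [ht, hpv, show l0.toList :: (midls.map String.toList ++ [ln.toList])
            = (l0.toList :: midls.map String.toList) ++ [ln.toList] from by simp,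
          pvIL_concat _ _ _ (by simp)]
        simp
      have hcut : PySem.Str.find (PySem.Str.replace (PySem.Str.replace s "\r\n" "\n") "\r" "\n") "\n"
          = (l0.toList.length : Int) := by
        rw [PySem.Str.find_eq, show ("\n" : String).toList = ['\n'] from rfl, hil1]
        exact pvFind_newline _ _ hnL0
      rw [if_neg (show ¬ (PySem.Str.find (PySem.Str.replace (PySem.Str.replace s "\r\n" "\n") "\r" "\n") "\n" = -1) from by
        rw [hcut]; omega)]
      have hfirstT : PySem.Str.slice (PySem.Str.replace (PySem.Str.replace s "\r\n" "\n") "\r" "\n") none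
          (some (PySem.Str.find (PySem.Str.replace (PySem.Str.replace s "\r\n" "\n") "\r" "\n") "\n")) = l0 := by
        apply String.toList_inj.mp
        rw [PySem.Str.toList_slice, hcut, PySem.Chars.slice_eq_listSlice,
          PySem.List.slice_to _ (Int.natCast_nonneg _)]
        simp only [Int.toNat_natCast]
        rw [hil1]
        exact List.take_left
      have hj : PySem.Str.rfind (PySem.Str.replace (PySem.Str.replace s "\r\n" "\n") "\r" "\n") "\n"
          = ((List.intercalate ['\n'] (l0.toList :: midls.map String.toList)).length : Int) := by
        rw [PySem.Str.rfind_eq, show ("\n" : String).toList = ['\n'] from rfl, hW]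
        exact pvRfind_newline _ _ hnLn
      have hlastT : PySem.Str.slice (PySem.Str.replace (PySem.Str.replace s "\r\n" "\n") "\r" "\n")
          (some (PySem.Str.rfind (PySem.Str.replace (PySem.Str.replace s "\r\n" "\n") "\r" "\n") "\n" + 1)) none = ln := by
        apply String.toList_inj.mp
        rw [PySem.Str.toList_slice, hj, PySem.Chars.slice_eq_listSlice]
        rw [show (((List.intercalate ['\n'] (l0.toList :: midls.map String.toList)).length : Int) + 1)
            = (((List.intercalate ['\n'] (l0.toList :: midls.map String.toList)).length + 1 : Nat) : Int) from by
          push_cast; ring]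
        rw [PySem.List.slice_from_natCast, hW,
          show List.intercalate ['\n'] (l0.toList :: midls.map String.toList) ++ '\n' :: ln.toList
            = (List.intercalate ['\n'] (l0.toList :: midls.map String.toList) ++ ['\n']) ++ ln.toList from by simp,
          show (List.intercalate ['\n'] (l0.toList :: midls.map String.toList)).length + 1
            = (List.intercalate ['\n'] (l0.toList :: midls.map String.toList) ++ ['\n']).length from by simp]
        exact List.drop_left
      rw [hfirstT, hlastT, hl]
      rw [show PySem.List.pyGetD (l0 :: (midls ++ [ln])) (0 : Int) "" = l0 from
        PySem.List.pyGetD_zero_cons l0 (midls ++ [ln]) ""]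
      rw [show PySem.List.pyGetD (l0 :: (midls ++ [ln])) (-1 : Int) "" = ln from by
        simpa using PySem.List.pyGetD_neg_one_append_singleton (xs := l0 :: midls) (x := ln) (d := "")]
      by_cases hcond : (PySem.Str.isIn "class " (PySem.Str.strip l0) && PySem.Str.strip ln == "}") = true
      · rw [if_pos hcond, if_pos hcond, pvSlice_one_neg_one]
        have hinner : PySem.Str.slice (PySem.Str.replace (PySem.Str.replace s "\r\n" "\n") "\r" "\n")
            (some (PySem.Str.find (PySem.Str.replace (PySem.Str.replace s "\r\n" "\n") "\r" "\n") "\n" + 1))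
            (some (PySem.Str.rfind (PySem.Str.replace (PySem.Str.replace s "\r\n" "\n") "\r" "\n") "\n"))
            = PySem.Str.join "\n" midls := by
          apply String.toList_inj.mp
          rw [PySem.Str.toList_slice, hcut, hj, PySem.Chars.slice_eq_listSlice, PySem.Str.toList_join,
            show ("\n" : String).toList = ['\n'] from rfl,
            show PySem.Chars.join ['\n'] (midls.map String.toList)
              = List.intercalate ['\n'] (midls.map String.toList) from rfl,
            show ((l0.toList.length : Int) + 1) = ((l0.toList.length + 1 : Nat) : Int) from by push_cast; ring,
            PySem.List.slice_natCast]
          rcases midls with _ | ⟨m1, ms⟩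
          · simp only [List.map_nil, List.nil_append]
            rw [show List.intercalate ['\n'] [l0.toList] = l0.toList from pvIL_single _ _]
            rw [show l0.toList.length - (l0.toList.length + 1) = 0 from by omega]
            rw [List.take_zero, pvIL_nil]
          · have hWexp : List.intercalate ['\n'] (l0.toList :: List.map String.toList (m1 :: ms))
                = l0.toList ++ ['\n'] ++ List.intercalate ['\n'] (List.map String.toList (m1 :: ms)) :=
              pvIL_cons _ _ _ (by simp)
            have hIL2 : List.intercalate ['\n'] (List.map String.toList (m1 :: ms) ++ [ln.toList])
                = List.intercalate ['\n'] (List.map String.toList (m1 :: ms)) ++ ['\n'] ++ ln.toList :=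
              pvIL_concat _ _ _ (by simp)
            rw [hil1, hIL2, hWexp]
            have hdrop : List.drop (l0.toList.length + 1)
                (l0.toList ++ '\n' :: (List.intercalate ['\n'] (List.map String.toList (m1 :: ms)) ++ ['\n'] ++ ln.toList))
                = List.intercalate ['\n'] (List.map String.toList (m1 :: ms)) ++ ['\n'] ++ ln.toList := by
              rw [show l0.toList ++ '\n' :: (List.intercalate ['\n'] (List.map String.toList (m1 :: ms)) ++ ['\n'] ++ ln.toList)
                  = (l0.toList ++ ['\n']) ++ (List.intercalate ['\n'] (List.map String.toList (m1 :: ms)) ++ ['\n'] ++ ln.toList) from by simp,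
                show l0.toList.length + 1 = (l0.toList ++ ['\n']).length from by simp]
              exact List.drop_left
            rw [hdrop]
            rw [show (l0.toList ++ ['\n'] ++ List.intercalate ['\n'] (List.map String.toList (m1 :: ms))).length
                - (l0.toList.length + 1) = (List.intercalate ['\n'] (List.map String.toList (m1 :: ms))).length from by
              simp; omega]
            rw [List.append_assoc]
            exact List.take_left
        rw [hinner]
      · rw [if_neg hcond, if_neg hcond]

-- ===== VERDICT (by name: the statement is the Claim_ definition above) =====
theorem strip_dummy_wrapper_py_spec : Claim_equal_strip_dummy_wrapper_py := by
  intro snippet hdom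
  unfold Spec_strip_dummy_wrapper_py
  rw [pvA_eq_mid, pvMid_eq_alt snippet hdom]
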